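-- pv_equiv track=rewrite | github.com/boogielams/makepeace | tools/impact-model/calibrate.py | find_trading_date
-- ===== SOURCE A (Python) =====
-- def find_trading_date(series: dict, target: str, direction: int) -> str | None:
--     dates = sorted(series.keys())
--     if not dates:
--         return None
--     if direction >= 0:
--         for d in dates:
--             if d >= target:
--                 return d
--     else:
--         for d in reversed(dates):
--             if d <= target:
--                 return d
--     return None
-- ===== SOURCE B (Python) =====
-- def find_trading_date(series: dict, target: str, direction: int) -> str | None:
--     # One linear pass over the keys instead of sort + scan:
--     # min key >= target (direction >= 0) / max key <= target (direction < 0).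
--     if direction >= 0:
--         cands = [d for d in series if d >= target]
--         return min(cands) if cands else None
--     cands = [d for d in series if d <= target]
--     return max(cands) if cands else None
-- ===== Notes on version B (the rewrite author's own statement) =====
-- stated objective: alternative
-- what changed: Replaced sort-then-linear-scan (forward for direction>=0, reversed for direction<0) by a single filtering pass over the unsorted keys followed by min/max of the candidates.
import Mathlib
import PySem

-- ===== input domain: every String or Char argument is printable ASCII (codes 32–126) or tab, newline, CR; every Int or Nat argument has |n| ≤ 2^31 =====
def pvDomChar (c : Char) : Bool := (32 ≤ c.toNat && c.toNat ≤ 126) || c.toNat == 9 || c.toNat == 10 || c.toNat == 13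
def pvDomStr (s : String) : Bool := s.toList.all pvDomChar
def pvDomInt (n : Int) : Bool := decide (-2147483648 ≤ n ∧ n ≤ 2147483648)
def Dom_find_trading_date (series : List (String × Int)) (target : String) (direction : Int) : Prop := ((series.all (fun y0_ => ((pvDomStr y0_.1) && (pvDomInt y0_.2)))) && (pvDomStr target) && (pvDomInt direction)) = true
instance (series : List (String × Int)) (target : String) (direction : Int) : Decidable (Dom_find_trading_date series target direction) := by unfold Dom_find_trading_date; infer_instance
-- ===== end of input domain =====

-- B replaces A's sort-then-scan by one filtering pass plus min/max of the candidates (alternative algorithm, O(n) vs O(n log n)).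

-- ===== PORT A =====
-- 'for d in dates: if d >= target: return d' (falls through to None)
def pvScanGe : List String → String → Option String
  | [], _ => none
  | d :: rest, target => if target ≤ d then some d else pvScanGe rest target

-- 'for d in reversed(dates): if d <= target: return d' (applied to dates.reverse)
def pvScanLe : List String → String → Option String
  | [], _ => none
  | d :: rest, target => if d ≤ target then some d else pvScanLe rest target

def find_trading_date (series : List (String × Int)) (target : String) (direction : Int) : Option String :=
  let dates := PySem.List.sorted (PySem.Dict.ofList series).keys (fun x => x) false
  if dates = [] then none
  else if direction ≥ 0 then pvScanGe dates target
  else pvScanLe dates.reverse target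

-- ===== PORT B =====
def find_trading_date_alt (series : List (String × Int)) (target : String) (direction : Int) : Option String :=
  if direction ≥ 0 then
    let cands := (PySem.Dict.ofList series).keys.filter (fun d => decide (target ≤ d))
    if cands = [] then none else PySem.List.min? cands (fun x => x)
  else
    let cands := (PySem.Dict.ofList series).keys.filter (fun d => decide (d ≤ target))
    if cands = [] then none else PySem.List.max? cands (fun x => x)

-- ===== PRECONDITION & SPEC =====
def Spec_find_trading_date (series : List (String × Int)) (target : String) (direction : Int) (out : Option String) : Prop := out = find_trading_date_alt series target direction
instance (series : List (String × Int)) (target : String) (direction : Int) (out : Option String) : Decidable (Spec_find_trading_date series target direction out) := by unfold Spec_find_trading_date; infer_instance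

-- ===== CLAIM (what is proved, stated in full; the proofs are below) =====
def Claim_equal_find_trading_date : Prop := ∀ (series : List (String × Int)) (target : String) (direction : Int), Dom_find_trading_date series target direction → Spec_find_trading_date series target direction (find_trading_date series target direction)

-- ===== LEMMAS AND PROOFS =====

-- the forward scan returns the head of the filtered list
theorem pvScanGe_eq_head_filter (l : List String) (t : String) :
    pvScanGe l t = (l.filter (fun d => decide (t ≤ d))).head? := by
  induction l with
  | nil => rfl
  | cons d rest ih =>
    by_cases h : t ≤ d <;> simp [pvScanGe, List.filter, h, ih]

theorem pvScanLe_eq_head_filter (l : List String) (t : String) :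
    pvScanLe l t = (l.filter (fun d => decide (d ≤ t))).head? := by
  induction l with
  | nil => rfl
  | cons d rest ih =>
    by_cases h : d ≤ t <;> simp [pvScanLe, List.filter, h, ih]

-- min?/max? pick the (unique) extremal value
theorem pv_min_eq {xs : List String} {m x : String}
    (hm : PySem.List.min? xs (fun y => y) = some m) (hx : x ∈ xs)
    (hle : ∀ y ∈ xs, x ≤ y) : m = x :=
  le_antisymm (PySem.List.min?_isMin hm x hx) (hle m (PySem.List.min?_mem hm))

theorem pv_max_eq {xs : List String} {m x : String}
    (hm : PySem.List.max? xs (fun y => y) = some m) (hx : x ∈ xs)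
    (hge : ∀ y ∈ xs, y ≤ x) : m = x :=
  le_antisymm (hge m (PySem.List.max?_mem hm)) (PySem.List.max?_isMax hm x hx)

-- ===== VERDICT (by name: the statement is the Claim_ definition above) =====
theorem find_trading_date_spec : Claim_equal_find_trading_date := by
  intro series target direction _
  unfold Spec_find_trading_date find_trading_date find_trading_date_alt
  set ks := (PySem.Dict.ofList series).keys with hks
  set l := PySem.List.sorted ks (fun x => x) false with hl
  have hperm : l.Perm ks := PySem.List.sorted_perm ks (fun x => x) false
  have hpw : l.Pairwise (· ≤ ·) := PySem.List.sorted_pairwise ks (fun x => x)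
  by_cases hd : direction ≥ 0
  · simp only [hd, if_true]
    rw [pvScanGe_eq_head_filter]
    have hpf : (l.filter (fun d => decide (target ≤ d))).Perm
        (ks.filter (fun d => decide (target ≤ d))) := hperm.filter _
    cases hfe : l.filter (fun d => decide (target ≤ d)) with
    | nil =>
      have hc : ks.filter (fun d => decide (target ≤ d)) = [] :=
        (hfe ▸ hpf).symm.eq_nil
      rw [hc, if_pos rfl]
      split <;> rfl
    | cons a rest =>
      have hlne : l ≠ [] := by
        intro h; rw [h] at hfe; simp at hfe
      have hcne : ks.filter (fun d => decide (target ≤ d)) ≠ [] := by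
        intro h; rw [h] at hpf; rw [hfe] at hpf
        exact absurd hpf.eq_nil (by simp)
      have ha : ∀ y ∈ ks.filter (fun d => decide (target ≤ d)), a ≤ y := by
        intro y hy
        have hy' : y ∈ l.filter (fun d => decide (target ≤ d)) := hpf.mem_iff.mpr hy
        rw [hfe, List.mem_cons] at hy'
        rcases hy' with rfl | hy'
        · exact le_refl _
        · exact (List.pairwise_cons.mp (hfe ▸ hpw.filter _)).1 y hy'
      obtain ⟨m, hm⟩ : ∃ m, PySem.List.min? (ks.filter (fun d => decide (target ≤ d))) (fun x => x) = some m := by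
        cases h : PySem.List.min? (ks.filter (fun d => decide (target ≤ d))) (fun x => x) with
        | none =>
          rw [PySem.List.min?_eq_none_iff] at h
          exact absurd h hcne
        | some m => exact ⟨m, rfl⟩
      have hamem : a ∈ ks.filter (fun d => decide (target ≤ d)) := by
        apply hpf.mem_iff.mp; rw [hfe]; exact List.mem_cons_self
      rw [if_neg hlne, if_neg hcne, hm, pv_min_eq hm hamem ha]
      rfl
  · simp only [hd, if_false]
    rw [pvScanLe_eq_head_filter, List.filter_reverse]
    have hpf : (l.filter (fun d => decide (d ≤ target))).Perm
        (ks.filter (fun d => decide (d ≤ target))) := hperm.filter _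
    cases hfe : (l.filter (fun d => decide (d ≤ target))).reverse with
    | nil =>
      have hf : l.filter (fun d => decide (d ≤ target)) = [] := by
        simpa using congrArg List.reverse hfe
      have hc : ks.filter (fun d => decide (d ≤ target)) = [] :=
        (hf ▸ hpf).symm.eq_nil
      rw [hc, if_pos rfl]
      split <;> rfl
    | cons a rest =>
      have hf : l.filter (fun d => decide (d ≤ target)) ≠ [] := by
        intro h; rw [h] at hfe; simp at hfe
      have hlne : l ≠ [] := by
        intro h; apply hf; rw [h]; rfl
      have hcne : ks.filter (fun d => decide (d ≤ target)) ≠ [] := by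
        intro h; rw [h] at hpf; exact hf hpf.eq_nil
      have hpwr : ((l.filter (fun d => decide (d ≤ target))).reverse).Pairwise
          (fun x y => y ≤ x) := (List.pairwise_reverse).mpr (hpw.filter _)
      have ha : ∀ y ∈ ks.filter (fun d => decide (d ≤ target)), y ≤ a := by
        intro y hy
        have hy' : y ∈ (l.filter (fun d => decide (d ≤ target))).reverse := by
          rw [List.mem_reverse]; exact hpf.mem_iff.mpr hy
        rw [hfe, List.mem_cons] at hy'
        rcases hy' with rfl | hy'
        · exact le_refl _
        · exact (List.pairwise_cons.mp (hfe ▸ hpwr)).1 y hy'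
      obtain ⟨m, hm⟩ : ∃ m, PySem.List.max? (ks.filter (fun d => decide (d ≤ target))) (fun x => x) = some m := by
        cases h : PySem.List.max? (ks.filter (fun d => decide (d ≤ target))) (fun x => x) with
        | none =>
          rw [PySem.List.max?_eq_none_iff] at h
          exact absurd h hcne
        | some m => exact ⟨m, rfl⟩
      have hamem : a ∈ ks.filter (fun d => decide (d ≤ target)) := by
        apply hpf.mem_iff.mp; rw [← List.mem_reverse, hfe]; exact List.mem_cons_self
      rw [if_neg hlne, if_neg hcne, hm, pv_max_eq hm hamem ha]
      rfl
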